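-- pv_equiv track=rewrite | github.com/gioe/aiq | scripts/check_magic_numbers.py | is_in_comment_or_string
-- ===== SOURCE A (Python) =====
-- def is_in_comment_or_string(line: str, match_start: int) -> bool:
--     """Check if a match position is inside a comment or string literal.
--
--     Args:
--         line: The full line content.
--         match_start: The position where the match starts.
--
--     Returns:
--         True if the position is inside a comment or string.
--     """
--     in_string = False
--     string_char = None
--     i = 0
--
--     while i < len(line):
--         char = line[i]
--
--         # Handle escape sequences
--         if char == "\\" and in_string and i + 1 < len(line):
--             i += 2  # Skip escaped character
--             continue
--
--         # Handle string boundaries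
--         if char in ('"', "'"):
--             # Check for triple quotes
--             triple = line[i : i + 3]
--             if triple in ('"""', "'''"):
--                 if not in_string:
--                     in_string = True
--                     string_char = triple
--                     i += 3
--                     continue
--                 elif string_char == triple:
--                     in_string = False
--                     string_char = None
--                     i += 3
--                     continue
--
--             # Single quotes
--             if not in_string:
--                 in_string = True
--                 string_char = char
--             elif string_char == char:
--                 in_string = False
--                 string_char = None
--
--         # Handle comments (only when not in string)
--         elif char == "#" and not in_string:
--             # Everything after # is a comment
--             if match_start >= i:
--                 return True
--
--         # Check if match_start is within a string
--         if i == match_start and in_string: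
--             return True
--
--         i += 1
--
--     # If we reached match_start while in_string, it's in a string
--     return in_string and match_start < len(line)
-- ===== SOURCE B (Python) =====
-- def _next_any(line, chars, p):
--     """Smallest index >= p where one of chars occurs in line, else -1."""
--     best = -1
--     for c in chars:
--         j = line.find(c, p)
--         if j != -1 and (best == -1 or j < best):
--             best = j
--     return best
--
--
-- def is_in_comment_or_string(line, match_start):
--     """Segment-jumping re-implementation: instead of a per-character state
--     machine, jump with str.find between 'interesting' characters, alternating
--     between a code phase and a string phase, and decide by interval membership
--     of match_start in the string-content regions."""
--     n = len(line)
--     p = 0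
--     while True:
--         # --- code phase: nothing before the next '#' or quote matters ---
--         j = _next_any(line, '#"\'', p)
--         if j == -1:
--             return False
--         if line[j] == '#':
--             if match_start >= j:
--                 return True
--             p = j + 1          # positions before j may still lie in a later
--             continue           # unclosed string (the scanner keeps parsing)
--         # a quote opens a string
--         if line[j:j + 3] in ('"""', "'''"):
--             delim, p, triple = line[j], j + 3, True
--         else:
--             if match_start == j:
--                 return True    # the opening quote itself counts as in-string
--             delim, p, triple = line[j], j + 1, False
--         # --- string phase: content runs between backslashes and delimiters ---
--         while True:
--             k = _next_any(line, '\\' + delim, p)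
--             if p <= match_start < (k if k != -1 else n):
--                 return True    # match_start inside string content
--             if k == -1:
--                 return match_start < n   # line ends inside an unclosed string
--             if line[k] == '\\':
--                 if k + 1 < n:
--                     p = k + 2            # skip escaped character
--                     continue
--                 return match_start < n   # trailing backslash: string stays open
--             if triple:
--                 if line[k:k + 3] == delim * 3:
--                     p = k + 3
--                     break                # string closed
--                 if match_start == k:
--                     return True          # lone quote inside a triple string
--                 p = k + 1
--             else:
--                 p = k + 1
--                 break                    # string closed
-- ===== Notes on version B (the rewrite author's own statement) =====
-- stated objective: faster
-- what changed: A walks the line one character at a time with an in_string/string_char state machine; B keeps no per-character state: it jumps between 'interesting' characters with str.find (C-speed), alternating a code phase and a string phase, and decides by interval membership of match_start in the string-content runs plus a comment-index comparison.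
import Mathlib
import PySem

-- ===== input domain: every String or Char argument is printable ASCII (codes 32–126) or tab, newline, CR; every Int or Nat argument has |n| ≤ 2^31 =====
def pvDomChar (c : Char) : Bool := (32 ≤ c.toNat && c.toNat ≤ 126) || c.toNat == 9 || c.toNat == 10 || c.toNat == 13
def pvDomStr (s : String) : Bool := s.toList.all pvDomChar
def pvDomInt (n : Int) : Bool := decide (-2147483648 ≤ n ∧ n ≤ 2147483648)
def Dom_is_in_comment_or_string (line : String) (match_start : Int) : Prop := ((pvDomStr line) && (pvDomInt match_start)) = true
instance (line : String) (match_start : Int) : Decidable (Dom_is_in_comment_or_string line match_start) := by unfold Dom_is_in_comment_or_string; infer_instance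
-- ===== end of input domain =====

-- B replaces A's per-character state machine by str.find-based segment jumping (code phase /
-- string phase, interval-membership decision); a timing run measured B faster at all sizes.

-- ===== PORT A =====
-- A's while loop as structural recursion on the scan index; early returns become `true` results.
def stepA (l : List Char) (ms : Int) (i : Nat) (ins : Bool) (sc : Option (List Char)) : Bool :=
  if h : i < l.length then
    if l[i] = '\\' ∧ ins = true ∧ i + 1 < l.length then
      stepA l ms (i + 2) ins sc
    else if l[i] = '"' ∨ l[i] = '\'' then
      if ((l.drop i).take 3 = ['"', '"', '"'] ∨ (l.drop i).take 3 = ['\'', '\'', '\'']) ∧ ins = false then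
        stepA l ms (i + 3) true (some ((l.drop i).take 3))
      else if ((l.drop i).take 3 = ['"', '"', '"'] ∨ (l.drop i).take 3 = ['\'', '\'', '\'']) ∧ ins = true ∧ sc = some ((l.drop i).take 3) then
        stepA l ms (i + 3) false none
      else if ins = false then
        -- opens a single-quoted string; then the common "i == match_start and in_string" check
        if (i : Int) = ms then true else stepA l ms (i + 1) true (some [l[i]])
      else if sc = some [l[i]] then
        -- closes the string; in_string is now false so the common check cannot fire
        stepA l ms (i + 1) false none
      else
        if (i : Int) = ms ∧ ins = true then true else stepA l ms (i + 1) ins sc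
    else if l[i] = '#' ∧ ins = false then
      if ms ≥ (i : Int) then true
      else if (i : Int) = ms ∧ ins = true then true
      else stepA l ms (i + 1) ins sc
    else
      if (i : Int) = ms ∧ ins = true then true
      else stepA l ms (i + 1) ins sc
  else ins && decide (ms < (l.length : Int))
termination_by l.length - i
decreasing_by all_goals omega

def is_in_comment_or_string (line : String) (match_start : Int) : Bool :=
  stepA line.toList match_start 0 false none

-- ===== PORT B =====
-- Source B's _next_any: minimum over the candidate characters of line.find(c, p).
def nextAny (l : List Char) (chars : List Char) (p : Nat) : Int :=
  chars.foldl (fun best c =>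
    let j := PySem.Chars.findFrom l [c] (p : Int)
    if j ≠ -1 ∧ (best = -1 ∨ j < best) then j else best) (-1)

-- the two lemmas the mutual definition below cites for termination
lemma findFrom_past (l : List Char) (c : Char) (p : Nat) (h : l.length < p) :
    PySem.Chars.findFrom l [c] (p : Int) = -1 := by
  unfold PySem.Chars.findFrom
  have h1 : ¬ ((p:Int) < 0) := by omega
  have h2 : ((l.length:Int) < (p:Int)) := by exact_mod_cast h
  simp only [h1, if_false, if_pos h2]

lemma findChar_range (l : List Char) (c : Char) (p : Nat) :
    PySem.Chars.findFrom l [c] (p : Int) ≠ -1 →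
    (p : Int) ≤ PySem.Chars.findFrom l [c] (p : Int) ∧
      PySem.Chars.findFrom l [c] (p : Int) < (l.length : Int) := by
  intro h
  by_cases hp : p ≤ l.length
  · obtain ⟨h1, h2, _⟩ := PySem.Chars.findFrom_natCast_spec l [c] p hp h
    refine ⟨h1, ?_⟩
    have hne : (List.drop (PySem.Chars.findFrom l [c] (p:Int)).toNat l) ≠ [] := by
      intro he
      rw [he] at h2
      simp at h2
    have hlt : (PySem.Chars.findFrom l [c] (p:Int)).toNat < l.length := by
      by_contra hge
      exact hne (List.drop_eq_nil_of_le (by omega))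
    omega
  · exact absurd (findFrom_past l c p (by omega)) h

lemma nextAny_range (l : List Char) (chars : List Char) (p : Nat) :
    nextAny l chars p ≠ -1 →
    (p : Int) ≤ nextAny l chars p ∧ nextAny l chars p < (l.length : Int) := by
  have aux : ∀ (cs : List Char) (b : Int), (b = -1 ∨ ((p:Int) ≤ b ∧ b < (l.length:Int))) →
      (cs.foldl (fun best c =>
        let j := PySem.Chars.findFrom l [c] (p : Int)
        if j ≠ -1 ∧ (best = -1 ∨ j < best) then j else best) b = -1 ∨
       ((p:Int) ≤ cs.foldl (fun best c =>
        let j := PySem.Chars.findFrom l [c] (p : Int)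
        if j ≠ -1 ∧ (best = -1 ∨ j < best) then j else best) b ∧
        cs.foldl (fun best c =>
        let j := PySem.Chars.findFrom l [c] (p : Int)
        if j ≠ -1 ∧ (best = -1 ∨ j < best) then j else best) b < (l.length:Int))) := by
    intro cs
    induction cs with
    | nil => intro b hb; simpa using hb
    | cons c cs ih =>
      intro b hb
      simp only [List.foldl_cons]
      apply ih
      by_cases hc : PySem.Chars.findFrom l [c] (p:Int) ≠ -1 ∧ (b = -1 ∨ PySem.Chars.findFrom l [c] (p:Int) < b)
      · rw [if_pos hc]
        exact Or.inr (findChar_range l c p hc.1)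
      · rw [if_neg hc]
        exact hb
  intro h
  rcases aux chars (-1) (Or.inl rfl) with h1 | h1
  · exact absurd h1 h
  · exact h1

lemma pvDec (l cs : List Char) (p a : Nat) (h : ¬ (nextAny l cs p = -1)) (_ : 1 ≤ a) :
    l.length + 1 - ((nextAny l cs p).toNat + a) < l.length + 1 - p := by
  have hr := nextAny_range l cs p h
  omega

-- Source B's two phases (outer while = code mode, inner while = string mode) as one recursion
-- on the scan position with a mode flag: none = code phase, some (delim, triple) = string phase.
def phaseB (l : List Char) (ms : Int) (st : Option (Char × Bool)) (p : Nat) : Bool :=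
  match st with
  | none =>
    let j := nextAny l ['#', '"', '\''] p
    if hj : j = -1 then false
    else
      let jn := j.toNat
      if l.getD jn ' ' = '#' then
        if ms ≥ (jn : Int) then true else phaseB l ms none (jn + 1)
      else if (l.drop jn).take 3 = ['"', '"', '"'] ∨ (l.drop jn).take 3 = ['\'', '\'', '\''] then
        phaseB l ms (some (l.getD jn ' ', true)) (jn + 3)
      else if (jn : Int) = ms then true
      else phaseB l ms (some (l.getD jn ' ', false)) (jn + 1)
  | some (d, triple) =>
    let k := nextAny l ['\\', d] p
    let stop : Int := if k = -1 then (l.length : Int) else k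
    if (p : Int) ≤ ms ∧ ms < stop then true
    else if hk : k = -1 then decide (ms < (l.length : Int))
    else
      let kn := k.toNat
      if l.getD kn ' ' = '\\' then
        if kn + 1 < l.length then phaseB l ms (some (d, triple)) (kn + 2)
        else decide (ms < (l.length : Int))
      else if triple then
        if (l.drop kn).take 3 = [d, d, d] then phaseB l ms none (kn + 3)
        else if (kn : Int) = ms then true
        else phaseB l ms (some (d, triple)) (kn + 1)
      else phaseB l ms none (kn + 1)
termination_by l.length + 1 - p
decreasing_by
  all_goals
    first
      | exact pvDec l ['#', '"', '\''] p _ hj (by decide)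
      | exact pvDec l ['\\', d] p _ hk (by decide)

def is_in_comment_or_string_alt (line : String) (match_start : Int) : Bool :=
  phaseB line.toList match_start none 0

-- ===== PRECONDITION & SPEC =====
def Spec_is_in_comment_or_string (line : String) (match_start : Int) (out : Bool) : Prop := out = is_in_comment_or_string_alt line match_start
instance (line : String) (match_start : Int) (out : Bool) : Decidable (Spec_is_in_comment_or_string line match_start out) := by unfold Spec_is_in_comment_or_string; infer_instance

-- ===== CLAIM =====
def Claim_equal_is_in_comment_or_string : Prop := ∀ (line : String) (match_start : Int), Dom_is_in_comment_or_string line match_start → Spec_is_in_comment_or_string line match_start (is_in_comment_or_string line match_start)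

-- ===== LEMMAS AND PROOFS =====

-- proof-side names for the two modes of phaseB
def codePhase (l : List Char) (ms : Int) (p : Nat) : Bool := phaseB l ms none p

def stringPhase (l : List Char) (ms : Int) (d : Char) (triple : Bool) (p : Nat) : Bool :=
  phaseB l ms (some (d, triple)) p

-- nextAny finds the first index ≥ p whose character is in chars (or -1)
def goodN (l : List Char) (p : Nat) (S : List Char) (r : Int) : Prop :=
  (r = -1 ∧ ∀ j (_ : j < l.length), p ≤ j → l[j] ∉ S) ∨
  (∃ jn : Nat, r = (jn : Int) ∧ p ≤ jn ∧ ∃ _ : jn < l.length, l[jn] ∈ S ∧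
    ∀ i (_ : i < l.length), p ≤ i → i < jn → l[i] ∉ S)

lemma prefix_singleton_iff (l : List Char) (c : Char) (i : Nat) (hi : i < l.length) :
    [c] <+: l.drop i ↔ l[i] = c := by
  rw [List.drop_eq_getElem_cons hi]
  constructor
  · intro h
    exact ((List.cons_prefix_cons).1 h).1.symm
  · intro h
    exact (List.cons_prefix_cons).2 ⟨h.symm, List.nil_prefix⟩

lemma findChar_good (l : List Char) (c : Char) (p : Nat) (hp : p ≤ l.length) :
    goodN l p [c] (PySem.Chars.findFrom l [c] (p : Int)) := by
  by_cases h : PySem.Chars.findFrom l [c] (p : Int) = -1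
  · left
    refine ⟨h, ?_⟩
    intro j hj hpj hmem
    have hc : l[j] = c := by simpa using hmem
    have h1 : [c] <+: l.drop j := (prefix_singleton_iff l c j hj).2 hc
    have h2 : l.drop j <:+ l.drop p := by
      have he : l.drop j = (l.drop p).drop (j - p) := by
        rw [List.drop_drop]; congr 1; omega
      rw [he]
      exact List.drop_suffix _ _
    have hinf : [c] <:+: l.drop p := h1.isInfix.trans h2.isInfix
    rw [(PySem.Chars.findFrom_natCast_eq_neg_one_iff l [c] p hp)] at h
    exact h hinf
  · right
    obtain ⟨h1, h2, h3⟩ := PySem.Chars.findFrom_natCast_spec l [c] p hp h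
    have hlt := (findChar_range l c p h).2
    refine ⟨(PySem.Chars.findFrom l [c] (p:Int)).toNat, by omega, by omega, by omega, ?_, ?_⟩
    · have hx := (prefix_singleton_iff l c _ (by omega)).1 h2
      simpa using hx
    · intro i hil hpi hlt2 hmem
      have hc : l[i] = c := by simpa using hmem
      exact h3 i hpi hlt2 ((prefix_singleton_iff l c i hil).2 hc)

lemma goodN_merge (l : List Char) (p : Nat) (S : List Char) (b : Int) (c : Char)
    (hp : p ≤ l.length) (hb : goodN l p S b) :
    goodN l p (S ++ [c])
      (if PySem.Chars.findFrom l [c] (p : Int) ≠ -1 ∧ (b = -1 ∨ PySem.Chars.findFrom l [c] (p : Int) < b)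
       then PySem.Chars.findFrom l [c] (p : Int) else b) := by
  have hf := findChar_good l c p hp
  split_ifs with hcond
  · rcases hf with ⟨hf1, _⟩ | ⟨jf, hf1, hf2, hf3, hf4, hf5⟩
    · exact absurd hf1 hcond.1
    · right
      refine ⟨jf, hf1, hf2, hf3, by simp at hf4 ⊢; exact Or.inr hf4, ?_⟩
      intro i hil hpi hlt hmem
      rcases List.mem_append.1 hmem with hm | hm
      · rcases hb with ⟨hb1, hb2⟩ | ⟨jb, hb1, hb2, hb3, hb4, hb5⟩
        · exact hb2 i hil hpi hm
        · rcases hcond.2 with hb0 | hb0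
          · rw [hb1] at hb0; omega
          · rw [hb1, hf1] at hb0
            exact hb5 i hil hpi (by omega) hm
      · exact hf5 i hil hpi hlt (by simpa using hm)
  · rcases hb with ⟨hb1, hb2⟩ | ⟨jb, hb1, hb2, hb3, hb4, hb5⟩
    · -- b = -1: the find must be -1 too, else the condition would have held
      have hfind : PySem.Chars.findFrom l [c] (p : Int) = -1 := by
        by_contra hne
        exact hcond ⟨hne, Or.inl hb1⟩
      left
      refine ⟨hb1, ?_⟩
      intro j hj hpj hmem
      rcases List.mem_append.1 hmem with hm | hm
      · exact hb2 j hj hpj hm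
      · rcases hf with ⟨_, hf2⟩ | ⟨jf, hf1, _⟩
        · exact hf2 j hj hpj (by simpa using hm)
        · rw [hf1] at hfind; omega
    · right
      refine ⟨jb, hb1, hb2, hb3, List.mem_append.2 (Or.inl hb4), ?_⟩
      intro i hil hpi hlt hmem
      rcases List.mem_append.1 hmem with hm | hm
      · exact hb5 i hil hpi hlt hm
      · have hci : l[i] = c := by simpa using hm
        rcases hf with ⟨_, hf2⟩ | ⟨jf, hf1, hf2, hf3, hf4, hf5⟩
        · exact hf2 i hil hpi (by simpa using hci)
        · have hge : ¬ jf < jb := by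
            intro hx
            exact hcond ⟨by rw [hf1]; omega, Or.inr (by rw [hf1, hb1]; exact_mod_cast hx)⟩
          exact hf5 i hil hpi (by omega) (by simpa using hci)

lemma nextAny_good (l : List Char) (p : Nat) (cs : List Char) (hp : p ≤ l.length) :
    goodN l p cs (nextAny l cs p) := by
  have aux : ∀ (cs' : List Char) (S : List Char) (b : Int), goodN l p S b →
      goodN l p (S ++ cs') (cs'.foldl (fun best c =>
        let j := PySem.Chars.findFrom l [c] (p : Int)
        if j ≠ -1 ∧ (best = -1 ∨ j < best) then j else best) b) := by
    intro cs'
    induction cs' with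
    | nil => intro S b hb; simpa using hb
    | cons c cs' ih =>
      intro S b hb
      have h1 := goodN_merge l p S b c hp hb
      have h2 := ih (S ++ [c]) _ h1
      simpa using h2
  have base : goodN l p [] (-1) := Or.inl ⟨rfl, by intro j hj hpj hmem; simp at hmem⟩
  have := aux cs [] (-1) base
  simpa [nextAny] using this

lemma getD_eq_getElem (l : List Char) (i : Nat) (h : i < l.length) : l.getD i ' ' = l[i] := by
  simp [List.getD_eq_getElem?_getD, h]

lemma take3_head (l : List Char) (jn : Nat) (q : Char) (h : jn < l.length)
    (ht : (l.drop jn).take 3 = [q, q, q]) : l[jn] = q := by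
  rw [List.drop_eq_getElem_cons h, show (3:Nat) = 2 + 1 by rfl, List.take_succ_cons] at ht
  injection ht with h1 _

lemma take3_len (l : List Char) (jn : Nat) (x y z : Char)
    (ht : (l.drop jn).take 3 = [x, y, z]) : jn + 3 ≤ l.length := by
  have := congrArg List.length ht
  simp at this
  omega

lemma codePhase_eq_none (l : List Char) (ms : Int) (p : Nat)
    (h : nextAny l ['#', '"', '\''] p = -1) : codePhase l ms p = false := by
  rw [codePhase, phaseB]
  simp [h]

lemma codePhase_eq_some (l : List Char) (ms : Int) (p jn : Nat)
    (h : nextAny l ['#', '"', '\''] p = (jn : Int)) :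
    codePhase l ms p =
      (if l.getD jn ' ' = '#' then
        (if ms ≥ (jn : Int) then true else codePhase l ms (jn + 1))
      else if (l.drop jn).take 3 = ['"', '"', '"'] ∨ (l.drop jn).take 3 = ['\'', '\'', '\''] then
        stringPhase l ms (l.getD jn ' ') true (jn + 3)
      else if (jn : Int) = ms then true
      else stringPhase l ms (l.getD jn ' ') false (jn + 1)) := by
  conv_lhs => rw [codePhase, phaseB]
  simp only [h, Int.toNat_natCast]
  rw [dif_neg (by omega : ¬ ((jn : Int) = -1))]
  rfl

lemma stringPhase_eq_none (l : List Char) (ms : Int) (d : Char) (triple : Bool) (p : Nat)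
    (h : nextAny l ['\\', d] p = -1) :
    stringPhase l ms d triple p =
      (if (p : Int) ≤ ms ∧ ms < (l.length : Int) then true else decide (ms < (l.length : Int))) := by
  conv_lhs => rw [stringPhase, phaseB]
  simp [h]

lemma stringPhase_eq_some (l : List Char) (ms : Int) (d : Char) (triple : Bool) (p kn : Nat)
    (h : nextAny l ['\\', d] p = (kn : Int)) :
    stringPhase l ms d triple p =
      (if (p : Int) ≤ ms ∧ ms < (kn : Int) then true
       else if l.getD kn ' ' = '\\' then
         (if kn + 1 < l.length then stringPhase l ms d triple (kn + 2)
          else decide (ms < (l.length : Int)))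
       else if triple then
         (if (l.drop kn).take 3 = [d, d, d] then codePhase l ms (kn + 3)
          else if (kn : Int) = ms then true
          else stringPhase l ms d triple (kn + 1))
       else codePhase l ms (kn + 1)) := by
  conv_lhs => rw [stringPhase, phaseB]
  simp only [h, Int.toNat_natCast]
  rw [if_neg (by omega : ¬ ((kn : Int) = -1)), dif_neg (by omega : ¬ ((kn : Int) = -1))]
  rfl

-- one boring step of A outside a string
lemma stepA_code_boring (l : List Char) (ms : Int) (i : Nat) (h : i < l.length)
    (hc : l[i] ∉ ['#', '"', '\'']) :
    stepA l ms i false none = stepA l ms (i + 1) false none := by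
  simp only [List.mem_cons, not_or] at hc
  rw [stepA, dif_pos h]
  rw [if_neg (by simp), if_neg (by tauto), if_neg (by simp [hc.1]), if_neg (by simp)]

-- one boring step of A inside a string (current char neither backslash nor the delimiter)
lemma stepA_string_boring (l : List Char) (ms : Int) (d : Char) (ds : List Char) (i : Nat)
    (h : i < l.length) (hds : ds = [d] ∨ ds = [d, d, d])
    (hne : l[i] ≠ '\\') (hnd : l[i] ≠ d) :
    stepA l ms i true (some ds) =
      (if (i : Int) = ms then true else stepA l ms (i + 1) true (some ds)) := by
  rw [stepA, dif_pos h]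
  rw [if_neg (by simp [hne])]
  have hsub2 : ¬ (((l.drop i).take 3 = ['"', '"', '"'] ∨ (l.drop i).take 3 = ['\'', '\'', '\'']) ∧
      true = true ∧ some ds = some ((l.drop i).take 3)) := by
    rintro ⟨hset, -, hsc⟩
    have hdseq : ds = (l.drop i).take 3 := Option.some.inj hsc
    rcases hset with h3 | h3 <;> rcases hds with hds | hds <;>
      rw [hds, h3] at hdseq <;> have hhead := take3_head l i _ h h3 <;> simp_all
  by_cases hq : (l[i] = '"' ∨ l[i] = '\'')
  · rw [if_pos hq, if_neg (by simp), if_neg hsub2, if_neg (by simp),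
      if_neg (by rcases hds with hds | hds <;> simp [hds] <;> intro hx <;> exact absurd hx.symm hnd)]
    simp only [and_true]
  · rw [if_neg hq, if_neg (by simp)]
    simp only [and_true]

-- skipping boring characters in A, code phase
lemma stepA_skip_code (l : List Char) (ms : Int) (p q : Nat) (hq : q ≤ l.length) (hpq : p ≤ q)
    (hb : ∀ i (_ : i < l.length), p ≤ i → i < q → l[i] ∉ ['#', '"', '\'']) :
    stepA l ms p false none = stepA l ms q false none := by
  have aux : ∀ (fuel p' : Nat), q - p' ≤ fuel → p ≤ p' → p' ≤ q →
      stepA l ms p' false none = stepA l ms q false none := by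
    intro fuel
    induction fuel with
    | zero =>
      intro p' h1 _ h3
      rw [show p' = q by omega]
    | succ fuel ih =>
      intro p' h1 h2 h3
      by_cases hpe : p' = q
      · rw [hpe]
      · rw [stepA_code_boring l ms p' (by omega) (hb p' (by omega) (by omega) (by omega))]
        exact ih (p' + 1) (by omega) (by omega) (by omega)
  exact aux q p (by omega) (by omega) hpq

-- skipping string content in A
lemma stepA_skip_string (l : List Char) (ms : Int) (d : Char) (ds : List Char) (p q : Nat)
    (hds : ds = [d] ∨ ds = [d, d, d])
    (hq : q ≤ l.length) (hpq : p ≤ q)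
    (hb : ∀ i (_ : i < l.length), p ≤ i → i < q → l[i] ∉ ['\\', d]) :
    stepA l ms p true (some ds) =
      (if (p : Int) ≤ ms ∧ ms < (q : Int) then true else stepA l ms q true (some ds)) := by
  have aux : ∀ (fuel p' : Nat), q - p' ≤ fuel → p ≤ p' → p' ≤ q →
      stepA l ms p' true (some ds) =
        (if (p' : Int) ≤ ms ∧ ms < (q : Int) then true else stepA l ms q true (some ds)) := by
    intro fuel
    induction fuel with
    | zero =>
      intro p' h1 _ h3
      rw [show p' = q by omega, if_neg (by omega)]
    | succ fuel ih =>
      intro p' h1 h2 h3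
      by_cases hpe : p' = q
      · rw [hpe, if_neg (by omega)]
      · have hbc := hb p' (by omega) (by omega) (by omega)
        simp only [List.mem_cons, not_or] at hbc
        rw [stepA_string_boring l ms d ds p' (by omega) hds hbc.1 hbc.2.1]
        rw [ih (p' + 1) (by omega) (by omega) (by omega)]
        push_cast
        by_cases hm : (p' : Int) = ms
        · rw [if_pos hm, if_pos (by omega)]
        · rw [if_neg hm]
          by_cases hr : (p' + 1 : Int) ≤ ms ∧ ms < (q : Int)
          · rw [if_pos hr, if_pos (by omega)]
          · rw [if_neg hr, if_neg (by omega)]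
  exact aux q p (by omega) (by omega) hpq
lemma phases_eq (l : List Char) (ms : Int) :
    ∀ (fuel p : Nat), l.length - p ≤ fuel → p ≤ l.length →
      (stepA l ms p false none = codePhase l ms p) ∧
      (∀ (d : Char) (triple : Bool), (d = '"' ∨ d = '\'') →
        stepA l ms p true (some (if triple then [d, d, d] else [d])) = stringPhase l ms d triple p) := by
  intro fuel
  induction fuel with
  | zero =>
    intro p hf hp
    have hpe : p = l.length := by omega
    subst hpe
    constructor
    · have hnone : nextAny l ['#', '"', '\''] l.length = -1 := by
        rcases nextAny_good l l.length ['#', '"', '\''] (le_refl _) with ⟨h1, _⟩ | ⟨jn, _, h2, h3, _⟩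
        · exact h1
        · omega
      rw [codePhase_eq_none l ms _ hnone, stepA, dif_neg (by omega)]
      simp
    · intro d triple hd
      have hnone : nextAny l ['\\', d] l.length = -1 := by
        rcases nextAny_good l l.length ['\\', d] (le_refl _) with ⟨h1, _⟩ | ⟨jn, _, h2, h3, _⟩
        · exact h1
        · omega
      rw [stringPhase_eq_none l ms d triple _ hnone, stepA, dif_neg (by omega),
        if_neg (by omega)]
      simp
  | succ fuel ih =>
    intro p hf hp
    constructor
    · -- code phase
      rcases nextAny_good l p ['#', '"', '\''] hp with ⟨h1, hnone⟩ | ⟨jn, hj, hpj, hjl, hmem, hmin⟩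
      · rw [codePhase_eq_none l ms p h1,
          stepA_skip_code l ms p l.length (le_refl _) hp (fun i hi hpi _ => hnone i hi hpi),
          stepA, dif_neg (by omega)]
        simp
      · rw [codePhase_eq_some l ms p jn hj,
          stepA_skip_code l ms p jn (by omega) hpj hmin,
          getD_eq_getElem l jn hjl]
        rcases (by simpa using hmem : l[jn] = '#' ∨ l[jn] = '"' ∨ l[jn] = '\'') with hc | hq
        · -- comment character
          rw [if_pos hc, stepA, dif_pos hjl, if_neg (by simp),
            if_neg (by rw [hc]; decide), if_pos ⟨hc, rfl⟩]
          by_cases hms : ms ≥ (jn : Int)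
          · rw [if_pos hms, if_pos hms]
          · rw [if_neg hms, if_neg hms, if_neg (by simp)]
            exact (ih (jn + 1) (by omega) (by omega)).1
        · have hnothash : ¬ (l[jn] = '#') := by rcases hq with h | h <;> rw [h] <;> decide
          rw [if_neg hnothash]
          by_cases htr : (l.drop jn).take 3 = ['"', '"', '"'] ∨ (l.drop jn).take 3 = ['\'', '\'', '\'']
          · -- triple quote opens
            rw [if_pos htr]
            have h3 : (l.drop jn).take 3 = [l[jn], l[jn], l[jn]] := by
              rcases htr with h3 | h3 <;> rw [h3] <;> rw [take3_head l jn _ hjl h3]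
            have hlen3 : jn + 3 ≤ l.length := take3_len l jn _ _ _ h3
            rw [stepA, dif_pos hjl, if_neg (by simp), if_pos hq, if_pos ⟨htr, rfl⟩, h3]
            have hih := (ih (jn + 3) (by omega) (by omega)).2 l[jn] true hq
            simpa using hih
          · -- single quote opens
            rw [if_neg htr, stepA, dif_pos hjl, if_neg (by simp), if_pos hq,
              if_neg (by rintro ⟨hx, -⟩; exact htr hx), if_neg (by simp), if_pos rfl]
            by_cases hms : (jn : Int) = ms
            · rw [if_pos hms, if_pos hms]
            · rw [if_neg hms, if_neg hms]
              have hih := (ih (jn + 1) (by omega) (by omega)).2 l[jn] false hq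
              simpa using hih
    · -- string phase
      intro d triple hd
      rcases nextAny_good l p ['\\', d] hp with ⟨h1, hnone⟩ | ⟨kn, hk, hpk, hkl, hmem, hmin⟩
      · rw [stringPhase_eq_none l ms d triple p h1,
          stepA_skip_string l ms d _ p l.length
            (by cases triple <;> simp) (le_refl _) hp (fun i hi hpi _ => hnone i hi hpi),
          stepA, dif_neg (by omega)]
        simp
      · rw [stringPhase_eq_some l ms d triple p kn hk,
          stepA_skip_string l ms d _ p kn (by cases triple <;> simp) (by omega) hpk hmin]
        by_cases hreg : (p : Int) ≤ ms ∧ ms < (kn : Int)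
        · rw [if_pos hreg, if_pos hreg]
        · rw [if_neg hreg, if_neg hreg, getD_eq_getElem l kn hkl]
          rcases (by simpa using hmem : l[kn] = '\\' ∨ l[kn] = d) with hc | hc
          · -- backslash
            rw [if_pos hc]
            by_cases hlt : kn + 1 < l.length
            · rw [if_pos hlt, stepA, dif_pos hkl, if_pos ⟨hc, rfl, hlt⟩]
              exact (ih (kn + 2) (by omega) (by omega)).2 d triple hd
            · rw [if_neg hlt, stepA, dif_pos hkl,
                if_neg (by rintro ⟨-, -, hx⟩; exact hlt hx),
                if_neg (by rw [hc]; decide), if_neg (by simp [hc]),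
                show kn + 1 = l.length by omega, stepA, dif_neg (by omega)]
              by_cases hms : (kn : Int) = ms
              · rw [if_pos (by exact ⟨hms, rfl⟩)]
                have : ms < (l.length : Int) := by omega
                simp [this]
              · rw [if_neg (by rintro ⟨hx, -⟩; exact hms hx)]
                simp
          · -- the delimiter character
            have hq' : l[kn] = '"' ∨ l[kn] = '\'' := by
              rcases hd with h | h <;> rw [hc, h] <;> simp
            have hnb : ¬ (l[kn] = '\\') := by rcases hd with h | h <;> rw [hc, h] <;> decide
            rw [if_neg hnb]
            cases triple with
            | true =>
              simp only [if_true]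
              by_cases hcl : (l.drop kn).take 3 = [d, d, d]
              · rw [if_pos hcl]
                have hset : (l.drop kn).take 3 = ['"', '"', '"'] ∨ (l.drop kn).take 3 = ['\'', '\'', '\''] := by
                  rcases hd with h | h <;> rw [hcl, h] <;> simp
                have hlen3 : kn + 3 ≤ l.length := take3_len l kn _ _ _ hcl
                rw [stepA, dif_pos hkl, if_neg (by rintro ⟨hx, -⟩; exact hnb hx), if_pos hq',
                  if_neg (by simp), if_pos ⟨hset, rfl, by rw [hcl]⟩]
                exact (ih (kn + 3) (by omega) (by omega)).1
              · rw [if_neg hcl]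
                have hsub2 : ¬ (((l.drop kn).take 3 = ['"', '"', '"'] ∨ (l.drop kn).take 3 = ['\'', '\'', '\'']) ∧
                    true = true ∧ some [d, d, d] = some ((l.drop kn).take 3)) := by
                  rintro ⟨hset, -, hsc⟩
                  have hdseq := Option.some.inj hsc
                  rcases hset with h3 | h3 <;> rw [h3] at hdseq <;>
                    · have hhead := take3_head l kn _ hkl h3
                      apply hcl
                      rw [h3]
                      injection hdseq with e1 _
                      rw [← e1]
                · rw [stepA, dif_pos hkl, if_neg (by rintro ⟨hx, -⟩; exact hnb hx), if_pos hq',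
                    if_neg (by simp), if_neg hsub2, if_neg (by simp),
                    if_neg (by simp)]
                  by_cases hms : (kn : Int) = ms
                  · rw [if_pos (by exact ⟨hms, rfl⟩), if_pos hms]
                  · rw [if_neg (by rintro ⟨hx, -⟩; exact hms hx), if_neg hms]
                    have hih := (ih (kn + 1) (by omega) (by omega)).2 d true hd
                    simpa using hih
            | false =>
              simp only [Bool.false_eq_true, if_false]
              have hsub2 : ¬ (((l.drop kn).take 3 = ['"', '"', '"'] ∨ (l.drop kn).take 3 = ['\'', '\'', '\'']) ∧
                  true = true ∧ some [d] = some ((l.drop kn).take 3)) := by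
                rintro ⟨hset, -, hsc⟩
                have hdseq := Option.some.inj hsc
                rcases hset with h3 | h3 <;> rw [h3] at hdseq <;> simp at hdseq
              rw [stepA, dif_pos hkl, if_neg (by rintro ⟨hx, -⟩; exact hnb hx), if_pos hq',
                if_neg (by simp), if_neg hsub2, if_neg (by simp),
                if_pos (by rw [hc])]
              exact (ih (kn + 1) (by omega) (by omega)).1

-- ===== VERDICT =====
theorem is_in_comment_or_string_spec : Claim_equal_is_in_comment_or_string := by
  intro line ms _
  unfold Spec_is_in_comment_or_string is_in_comment_or_string is_in_comment_or_string_alt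
  exact (phases_eq line.toList ms line.toList.length 0 (by omega) (by omega)).1
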